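-- pv_equiv track=rewrite | github.com/DraculaHub786/aqi-health-system | models/nlp_engine.py | summarize_air_quality_report
-- ===== SOURCE A (Python) =====
-- def summarize_air_quality_report(
--
--     full_report: str,
--     max_length: int = 150
-- ) -> str:
--     """
--     Summarize lengthy air quality reports using extractive summarization
--
--     Args:
--         full_report: Full report text
--         max_length: Maximum summary length
--
--     Returns:
--         Summarized text
--     """
--     if len(full_report) <= max_length:
--         return full_report
--
--     # Extract key sentences based on importance keywords
--     sentences = full_report.replace('!', '.').replace('?', '.').split('.')
--     sentences = [s.strip() for s in sentences if s.strip()]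
--
--     # Priority keywords for AQI reports
--     priority_keywords = ['aqi', 'health', 'risk', 'warning', 'safe', 'danger', 'recommend']
--
--     # Score sentences by keyword presence
--     scored = []
--     for s in sentences:
--         score = sum(1 for kw in priority_keywords if kw in s.lower())
--         scored.append((score, s))
--
--     # Take highest scored sentences that fit
--     scored.sort(reverse=True, key=lambda x: x[0])
--     summary = ""
--     for _, sentence in scored:
--         if len(summary) + len(sentence) + 2 <= max_length:
--             summary += sentence + ". "
--         if len(summary) >= max_length * 0.8:
--             break
--
--     return summary.strip() if summary else full_report[:max_length] + "..."
-- ===== SOURCE B (Python) =====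
-- def summarize_air_quality_report(
--     full_report: str,
--     max_length: int = 150
-- ) -> str:
--     """Extractive summary: bucket sentences by keyword score (counting sort)
--     instead of building and sorting a (score, sentence) list."""
--     if len(full_report) <= max_length:
--         return full_report
--
--     sentences = full_report.replace('!', '.').replace('?', '.').split('.')
--     sentences = [s.strip() for s in sentences if s.strip()]
--
--     priority_keywords = ['aqi', 'health', 'risk', 'warning', 'safe', 'danger', 'recommend']
--
--     # Counting-sort buckets: scores can only be 0..7
--     buckets = [[] for _ in range(8)]
--     for s in sentences:
--         score = sum(1 for kw in priority_keywords if kw in s.lower())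
--         buckets[score].append(s)
--
--     summary = ""
--     stop = False
--     for score in range(7, -1, -1):
--         if stop:
--             break
--         for sentence in buckets[score]:
--             if len(summary) + len(sentence) + 2 <= max_length:
--                 summary += sentence + ". "
--             if len(summary) >= max_length * 0.8:
--                 stop = True
--                 break
--
--     return summary.strip() if summary else full_report[:max_length] + "..."
-- ===== Notes on version B (the rewrite author's own statement) =====
-- stated objective: alternative
-- what changed: Replaces building a (score, sentence) list and stable reverse-sorting it by a counting sort: sentences are appended into 8 score buckets in one pass and consumed from score 7 down to 0, feeding the same greedy accumulation.
import Mathlib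
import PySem

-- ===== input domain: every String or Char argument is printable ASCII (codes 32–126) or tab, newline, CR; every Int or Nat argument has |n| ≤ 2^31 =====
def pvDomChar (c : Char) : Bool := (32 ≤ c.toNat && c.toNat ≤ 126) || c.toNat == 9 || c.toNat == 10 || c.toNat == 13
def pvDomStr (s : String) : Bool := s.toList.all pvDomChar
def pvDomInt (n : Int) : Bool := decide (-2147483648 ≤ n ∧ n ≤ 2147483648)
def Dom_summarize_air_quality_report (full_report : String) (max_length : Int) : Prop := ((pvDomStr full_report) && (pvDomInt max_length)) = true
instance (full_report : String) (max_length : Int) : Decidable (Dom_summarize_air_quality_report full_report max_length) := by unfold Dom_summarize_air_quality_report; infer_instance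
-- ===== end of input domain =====

-- B replaces A's build-pairs-then-stable-sort step by counting-sort buckets indexed by the
-- keyword score (0..7), filled in forward order and consumed from score 7 down to 0; same
-- greedy accumulation. Objective: alternative (same cost, different data structure).

-- ===== PORT A =====
-- helpers shared by both ports: these lines of Python are verbatim identical in A and B
def pvKeywords : List (List Char) :=
  ["aqi".toList, "health".toList, "risk".toList, "warning".toList, "safe".toList, "danger".toList, "recommend".toList]

def pvSentences (full_report : String) : List (List Char) :=
  ((PySem.Chars.splitOn (PySem.Chars.replace (PySem.Chars.replace full_report.toList ['!'] ['.']) ['?'] ['.']) ['.']).map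
    PySem.Chars.strip).filter (fun s => !s.isEmpty)

def pvScore (s : List Char) : Int :=
  (pvKeywords.map (fun kw => if PySem.Chars.isIn kw (PySem.Chars.lower s) then (1 : Int) else 0)).sum

-- A's greedy loop with break; Python's `len(summary) >= max_length*0.8` (float) is exact as
-- 5*len ≥ 4*max_length for |max_length| ≤ 2^31 (the stated domain)
def pvGreedyA (m : Int) : List (Int × List Char) → List Char → List Char
  | [], acc => acc
  | p :: rest, acc =>
    let acc' := if (acc.length : Int) + p.2.length + 2 ≤ m then acc ++ p.2 ++ ['.', ' '] else acc
    if 5 * (acc'.length : Int) ≥ 4 * m then acc' else pvGreedyA m rest acc'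

def summarize_air_quality_report (full_report : String) (max_length : Int) : String :=
  if (full_report.toList.length : Int) ≤ max_length then full_report
  else
    let scored := (pvSentences full_report).map (fun s => (pvScore s, s))
    let ordered := PySem.List.sorted scored (fun p => p.1) true
    let summary := pvGreedyA max_length ordered []
    if summary ≠ [] then String.ofList (PySem.Chars.strip summary)
    else String.ofList (PySem.Chars.slice full_report.toList none (some max_length) ++ "...".toList)

-- ===== PORT B =====
-- loop body of B's inner `for sentence in buckets[score]` (the break becomes the stop flag)
def pvStepB (m : Int) (st : List Char × Bool) (s : List Char) : List Char × Bool :=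
  if st.2 then st
  else
    let acc := if (st.1.length : Int) + s.length + 2 ≤ m then st.1 ++ s ++ ['.', ' '] else st.1
    (acc, decide (5 * (acc.length : Int) ≥ 4 * m))

def summarize_air_quality_report_alt (full_report : String) (max_length : Int) : String :=
  if (full_report.toList.length : Int) ≤ max_length then full_report
  else
    let sentences := pvSentences full_report
    let buckets := sentences.foldl
      (fun b s => PySem.List.pySetD b (pvScore s) (PySem.List.pyGetD b (pvScore s) [] ++ [s]))
      (List.replicate 8 ([] : List (List Char)))
    let st := (PySem.List.pyRange 7 (-1) (-1)).foldl
      (fun st k => if st.2 then st else (PySem.List.pyGetD buckets k []).foldl (pvStepB max_length) st)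
      (([] : List Char), false)
    let summary := st.1
    if summary ≠ [] then String.ofList (PySem.Chars.strip summary)
    else String.ofList (PySem.Chars.slice full_report.toList none (some max_length) ++ "...".toList)

-- ===== PRECONDITION & SPEC =====
def Spec_summarize_air_quality_report (full_report : String) (max_length : Int) (out : String) : Prop := out = summarize_air_quality_report_alt full_report max_length
instance (full_report : String) (max_length : Int) (out : String) : Decidable (Spec_summarize_air_quality_report full_report max_length out) := by unfold Spec_summarize_air_quality_report; infer_instance

-- ===== CLAIM (what is proved, stated in full; the proofs are below) =====
def Claim_equal_summarize_air_quality_report : Prop := ∀ (full_report : String) (max_length : Int), Dom_summarize_air_quality_report full_report max_length → Spec_summarize_air_quality_report full_report max_length (summarize_air_quality_report full_report max_length)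

-- ===== LEMMAS AND PROOFS =====

-- descending buckets by score: descB sc k xs = elements of score k, then k-1, …, then 0
def descB {α : Type} (sc : α → Int) : Nat → List α → List α
  | 0, xs => xs.filter (fun p => sc p == 0)
  | k + 1, xs => xs.filter (fun p => sc p == ((k : Int) + 1)) ++ descB sc k xs

-- greedy loop returning the stop flag
def pvGreedyP (m : Int) : List (List Char) → List Char → List Char × Bool
  | [], acc => (acc, false)
  | s :: rest, acc =>
    let acc' := if (acc.length : Int) + s.length + 2 ≤ m then acc ++ s ++ ['.', ' '] else acc
    if 5 * (acc'.length : Int) ≥ 4 * m then (acc', true) else pvGreedyP m rest acc'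

theorem pvScore_nonneg (s : List Char) : 0 ≤ pvScore s := by
  unfold pvScore pvKeywords
  simp only [List.map, List.sum_cons, List.sum_nil]
  split_ifs <;> norm_num

theorem pvScore_le (s : List Char) : pvScore s ≤ 7 := by
  unfold pvScore pvKeywords
  simp only [List.map, List.sum_cons, List.sum_nil]
  split_ifs <;> norm_num

theorem insertBy_all_before {α : Type} (before : α → α → Bool) (x : α) (l : List α)
    (h : ∀ y ∈ l, before x y = true) : PySem.List.insertBy before x l = x :: l := by
  cases l with
  | nil => rfl
  | cons y ys => simp [PySem.List.insertBy, h y (List.mem_cons_self ..)]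

theorem insertBy_append_skip {α : Type} (before : α → α → Bool) (x : α) (pre l : List α)
    (h : ∀ y ∈ pre, before x y = false) :
    PySem.List.insertBy before x (pre ++ l) = pre ++ PySem.List.insertBy before x l := by
  induction pre with
  | nil => simp
  | cons y ys ih =>
    have hy := h y (List.mem_cons_self ..)
    simp [PySem.List.insertBy, hy, ih (fun z hz => h z (List.mem_cons_of_mem _ hz))]

theorem descB_nil {α : Type} (sc : α → Int) (k : Nat) : descB sc k [] = [] := by
  induction k with
  | zero => rfl
  | succ k ih => simp [descB, ih]

theorem mem_descB {α : Type} (sc : α → Int) (k : Nat) (xs : List α) (y : α)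
    (h : y ∈ descB sc k xs) : sc y ≤ (k : Int) := by
  induction k with
  | zero =>
    simp only [descB, List.mem_filter] at h
    have := h.2
    simp at this
    omega
  | succ k ih =>
    simp only [descB, List.mem_append] at h
    rcases h with h | h
    · have := (List.mem_filter.mp h).2
      simp at this
      omega
    · have := ih h
      push_cast
      omega

theorem descB_append_singleton_gt {α : Type} (sc : α → Int) (k : Nat) (xs : List α) (x : α)
    (h : (k : Int) < sc x) : descB sc k (xs ++ [x]) = descB sc k xs := by
  induction k with
  | zero =>
    have hx : (sc x == (0:Int)) = false := by simp; omega
    simp [descB, List.filter_append, hx]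
  | succ k ih =>
    have hx : (sc x == ((k:Int)+1)) = false := by
      simp
      push_cast at h
      omega
    have hk : (k : Int) < sc x := by push_cast at h ⊢; omega
    simp [descB, List.filter_append, hx, ih hk]

theorem ins_descB {α : Type} (sc : α → Int) (k : Nat) (x : α) (xs : List α)
    (h0 : 0 ≤ sc x) (h1 : sc x ≤ (k : Int)) :
    PySem.List.insertBy (fun a b => decide (sc b < sc a)) x (descB sc k xs) = descB sc k (xs ++ [x]) := by
  induction k with
  | zero =>
    have hx : sc x = 0 := by omega
    rw [PySem.List.insertBy_of_forall_not_before]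
    · have hxx : (sc x == (0:Int)) = true := by simp [hx]
      simp [descB, List.filter_append, hxx]
    · intro y hy
      have := (List.mem_filter.mp hy).2
      simp at this ⊢
      omega
  | succ k ih =>
    by_cases hc : sc x ≤ (k : Int)
    · have hx : (sc x == ((k:Int)+1)) = false := by simp; omega
      rw [descB, insertBy_append_skip, ih hc]
      · simp [descB, List.filter_append, hx]
      · intro y hy
        have := (List.mem_filter.mp hy).2
        simp at this ⊢
        omega
    · have hx : sc x = (k : Int) + 1 := by push_cast at h1; omega
      have hxx : (sc x == ((k:Int)+1)) = true := by simp [hx]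
      rw [descB, insertBy_append_skip, insertBy_all_before]
      · rw [descB, List.filter_append, descB_append_singleton_gt sc k xs x (by omega)]
        simp [hxx]
      · intro y hy
        have := mem_descB sc k xs y hy
        simp
        omega
      · intro y hy
        have := (List.mem_filter.mp hy).2
        simp at this ⊢
        omega

theorem foldl_ins_descB {α : Type} (sc : α → Int) (xs : List α) (pref : List α)
    (h : ∀ p ∈ xs, 0 ≤ sc p ∧ sc p ≤ 7) :
    xs.foldl (fun acc x => PySem.List.insertBy (fun a b => decide (sc b < sc a)) x acc) (descB sc 7 pref)
      = descB sc 7 (pref ++ xs) := by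
  induction xs generalizing pref with
  | nil => simp
  | cons x xs ih =>
    have hx := h x (List.mem_cons_self ..)
    rw [List.foldl_cons, ins_descB sc 7 x pref hx.1 (by exact_mod_cast hx.2),
      ih (pref ++ [x]) (fun p hp => h p (List.mem_cons_of_mem _ hp)), List.append_assoc]
    rfl

theorem sorted_eq_descB {α : Type} (sc : α → Int) (xs : List α)
    (h : ∀ p ∈ xs, 0 ≤ sc p ∧ sc p ≤ 7) :
    PySem.List.sorted xs sc true = descB sc 7 xs := by
  rw [PySem.List.sorted_rev_eq_foldl_insertBy]
  have h0 : descB sc 7 ([] : List α) = [] := descB_nil sc 7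
  calc xs.foldl (fun acc x => PySem.List.insertBy (fun a b => decide (sc b < sc a)) x acc) []
      = xs.foldl (fun acc x => PySem.List.insertBy (fun a b => decide (sc b < sc a)) x acc) (descB sc 7 []) := by rw [h0]
    _ = descB sc 7 ([] ++ xs) := foldl_ins_descB sc xs [] h
    _ = descB sc 7 xs := by simp

theorem descB_map_pair (ss : List (List Char)) (k : Nat) :
    (descB (fun p => p.1) k (ss.map (fun s => (pvScore s, s)))).map Prod.snd = descB pvScore k ss := by
  induction k with
  | zero => simp [descB, List.filter_map, Function.comp_def, List.map_map]
  | succ k ih => simp [descB, List.filter_map, Function.comp_def, List.map_map, ih]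

theorem greedyA_eq_greedyP (m : Int) (ps : List (Int × List Char)) (acc : List Char) :
    pvGreedyA m ps acc = (pvGreedyP m (ps.map Prod.snd) acc).1 := by
  induction ps generalizing acc with
  | nil => rfl
  | cons p ps ih =>
    simp only [pvGreedyA, pvGreedyP, List.map_cons]
    split
    all_goals split
    all_goals first | rfl | exact ih _

theorem stepB_stop (m : Int) (ss : List (List Char)) (st : List Char × Bool) (h : st.2 = true) :
    ss.foldl (pvStepB m) st = st := by
  induction ss generalizing st with
  | nil => rfl
  | cons s ss ih => simp only [List.foldl_cons, pvStepB, h, if_true]; exact ih st h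

theorem foldl_stepB_eq_greedyP (m : Int) (ss : List (List Char)) (acc : List Char) :
    ss.foldl (pvStepB m) (acc, false) = pvGreedyP m ss acc := by
  induction ss generalizing acc with
  | nil => rfl
  | cons s ss ih =>
    rw [List.foldl_cons]
    show List.foldl (pvStepB m)
        ((if (acc.length : Int) + s.length + 2 ≤ m then acc ++ s ++ ['.', ' '] else acc),
          decide (5 * (((if (acc.length : Int) + s.length + 2 ≤ m then acc ++ s ++ ['.', ' '] else acc)).length : Int) ≥ 4 * m)) ss
      = pvGreedyP m (s :: ss) acc
    set acc' := if (acc.length : Int) + s.length + 2 ≤ m then acc ++ s ++ ['.', ' '] else acc with hacc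
    simp only [pvGreedyP]
    by_cases hc : 5 * (acc'.length : Int) ≥ 4 * m
    · rw [if_pos hc, decide_eq_true hc]
      exact stepB_stop m ss _ rfl
    · rw [if_neg hc, decide_eq_false hc]
      exact ih _

theorem greedyP_append (m : Int) (xs ys : List (List Char)) (acc : List Char) :
    pvGreedyP m (xs ++ ys) acc
      = if (pvGreedyP m xs acc).2 then pvGreedyP m xs acc else pvGreedyP m ys (pvGreedyP m xs acc).1 := by
  induction xs generalizing acc with
  | nil => simp [pvGreedyP]
  | cons x xs ih =>
    simp only [List.cons_append, pvGreedyP]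
    set acc' := if (acc.length : Int) + x.length + 2 ≤ m then acc ++ x ++ ['.', ' '] else acc with hacc
    by_cases hc : 5 * (acc'.length : Int) ≥ 4 * m
    · simp [hc]
    · simp only [if_neg hc]
      exact ih _

theorem outer_stop (m : Int) (lookup : Int → List (List Char)) (ks : List Int)
    (st : List Char × Bool) (h : st.2 = true) :
    ks.foldl (fun st k => if st.2 then st else (lookup k).foldl (pvStepB m) st) st = st := by
  induction ks generalizing st with
  | nil => rfl
  | cons k ks ih => simp only [List.foldl_cons, h, if_true]; exact ih st h

theorem outer_eq_greedyP (m : Int) (lookup : Int → List (List Char)) (ks : List Int) (acc : List Char) :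
    ks.foldl (fun st k => if st.2 then st else (lookup k).foldl (pvStepB m) st) (acc, false)
      = pvGreedyP m (ks.flatMap lookup) acc := by
  induction ks generalizing acc with
  | nil => rfl
  | cons k ks ih =>
    simp only [List.foldl_cons, List.flatMap_cons, Bool.false_eq_true, if_false,
      foldl_stepB_eq_greedyP, greedyP_append]
    rcases hst : (pvGreedyP m (lookup k) acc) with ⟨r, f⟩
    cases f with
    | true =>
      rw [outer_stop m lookup ks (r, true) rfl]
      simp
    | false =>
      simp only [if_false, Bool.false_eq_true]
      exact ih r

theorem buckets_getD (ss : List (List Char)) (b : List (List (List Char))) (hb : b.length = 8)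
    (k : Int) (hk0 : 0 ≤ k) (hk : k < 8) :
    PySem.List.pyGetD
      (ss.foldl (fun b s => PySem.List.pySetD b (pvScore s) (PySem.List.pyGetD b (pvScore s) [] ++ [s])) b)
      k []
      = PySem.List.pyGetD b k [] ++ ss.filter (fun s => pvScore s == k) := by
  induction ss generalizing b with
  | nil => simp
  | cons s ss ih =>
    have hs0 := pvScore_nonneg s
    have hs7 := pvScore_le s
    have hset : PySem.List.pySetD b (pvScore s) (PySem.List.pyGetD b (pvScore s) [] ++ [s])
        = b.set (pvScore s).toNat (PySem.List.pyGetD b (pvScore s) [] ++ [s]) :=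
      PySem.List.pySetD_of_nonneg _ _ hs0
    have hlen : (b.set (pvScore s).toNat (PySem.List.pyGetD b (pvScore s) [] ++ [s])).length = 8 := by
      simp [hb]
    rw [List.foldl_cons, hset, ih _ hlen]
    have hgs : PySem.List.pyGetD (b.set (pvScore s).toNat (PySem.List.pyGetD b (pvScore s) [] ++ [s])) k []
        = if (pvScore s).toNat = k.toNat then PySem.List.pyGetD b (pvScore s) [] ++ [s]
          else PySem.List.pyGetD b k [] := by
      rw [PySem.List.pyGetD_eq_getElem _ _ hk0 (by rw [hlen]; exact_mod_cast hk)]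
      rw [List.getElem_set]
      split
      · rfl
      · rw [PySem.List.pyGetD_eq_getElem _ _ hk0 (by rw [hb]; exact_mod_cast hk)]
    rw [hgs]
    by_cases hkk : pvScore s = k
    · have h1 : (pvScore s).toNat = k.toNat := by rw [hkk]
      have h2 : (pvScore s == k) = true := by simp [hkk]
      rw [if_pos h1]
      simp only [List.filter_cons, h2, if_true]
      rw [hkk, List.append_assoc]
      rfl
    · have h1 : (pvScore s).toNat ≠ k.toNat := by omega
      have h2 : (pvScore s == k) = false := by simp [hkk]
      rw [if_neg h1]
      simp [h2]

-- ===== VERDICT (by name: the statement is the Claim_ definition above) =====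
theorem summarize_air_quality_report_spec : Claim_equal_summarize_air_quality_report := by
  intro fr m _
  unfold Spec_summarize_air_quality_report
  simp only [summarize_air_quality_report, summarize_air_quality_report_alt]
  by_cases hg : (fr.toList.length : Int) ≤ m
  · simp only [if_pos hg]
  · simp only [if_neg hg]
    have hsum :
        pvGreedyA m (PySem.List.sorted ((pvSentences fr).map (fun s => (pvScore s, s))) (fun p => p.1) true) []
          = ((PySem.List.pyRange 7 (-1) (-1)).foldl
              (fun st k => if st.2 then st else (PySem.List.pyGetD ((pvSentences fr).foldl
                (fun b s => PySem.List.pySetD b (pvScore s) (PySem.List.pyGetD b (pvScore s) [] ++ [s]))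
                (List.replicate 8 ([] : List (List Char)))) k []).foldl (pvStepB m) st)
              (([] : List Char), false)).1 := by
      have hR : PySem.List.pyRange 7 (-1) (-1) = [7, 6, 5, 4, 3, 2, 1, 0] := by decide
      set ss := pvSentences fr with hss
      set buckets := ss.foldl (fun b s => PySem.List.pySetD b (pvScore s) (PySem.List.pyGetD b (pvScore s) [] ++ [s])) (List.replicate 8 ([] : List (List Char))) with hbk
      have hrep : ∀ k : Int, 0 ≤ k → k < 8 → PySem.List.pyGetD (List.replicate 8 ([] : List (List Char))) k [] = [] := by
        intro k h0 h1
        rw [PySem.List.pyGetD_eq_getElem _ _ h0 (by rw [List.length_replicate]; omega)]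
        rw [List.getElem_replicate]
      have hlu : ∀ k : Int, 0 ≤ k → k < 8 → PySem.List.pyGetD buckets k [] = ss.filter (fun s => pvScore s == k) := by
        intro k h0 h1
        rw [hbk, buckets_getD ss _ (by simp) k h0 h1, hrep k h0 h1, List.nil_append]
      rw [hR, outer_eq_greedyP m _ _ []]
      rw [greedyA_eq_greedyP, sorted_eq_descB _ _ (by
        intro p hp
        rcases List.mem_map.mp hp with ⟨s, _, rfl⟩
        exact ⟨pvScore_nonneg s, pvScore_le s⟩), descB_map_pair]
      have hflat : ([7, 6, 5, 4, 3, 2, 1, 0] : List Int).flatMap (fun k => PySem.List.pyGetD buckets k [])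
          = descB pvScore 7 ss := by
        rw [List.flatMap_cons, List.flatMap_cons, List.flatMap_cons, List.flatMap_cons,
          List.flatMap_cons, List.flatMap_cons, List.flatMap_cons, List.flatMap_cons, List.flatMap_nil]
        rw [hlu 7 (by norm_num) (by norm_num), hlu 6 (by norm_num) (by norm_num),
          hlu 5 (by norm_num) (by norm_num), hlu 4 (by norm_num) (by norm_num),
          hlu 3 (by norm_num) (by norm_num), hlu 2 (by norm_num) (by norm_num),
          hlu 1 (by norm_num) (by norm_num), hlu 0 (by norm_num) (by norm_num)]
        norm_num [descB]
      rw [hflat]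
    rw [hsum]
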